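-- pv_equiv track=rewrite | github.com/curdriceaurora/fo-core | src/file_organizer/methodologies/johnny_decimal/scanner.py | _looks_like_jd_number
-- ===== SOURCE A (Python) =====
-- def _looks_like_jd_number(name: str) -> bool:
--     """Check if a folder name looks like it contains a JD number.
--
--     Args:
--         name: Folder name
--
--     Returns:
--         True if name appears to contain JD number
--     """
--     # Check for patterns like "10", "11.01", "11.01.001"
--     parts = name.split()
--     if not parts:
--         return False
--
--     first_part = parts[0]
--
--     # Check for two-digit area number
--     if first_part.isdigit() and len(first_part) == 2:
--         return True
--
--     # Check for category number (XX.XX)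
--     if "." in first_part:
--         number_parts = first_part.split(".")
--         if len(number_parts) == 2 and all(p.isdigit() and len(p) == 2 for p in number_parts):
--             return True
--         # Check for ID (XX.XX.XXX)
--         if len(number_parts) == 3:
--             if (
--                 all(p.isdigit() for p in number_parts)
--                 and len(number_parts[0]) == 2
--                 and len(number_parts[1]) == 2
--                 and len(number_parts[2]) == 3
--             ):
--                 return True
--
--     return False
-- ===== SOURCE B (Python) =====
-- _JD_TEMPLATES = {2: "dd", 5: "dd.dd", 9: "dd.dd.ddd"}
--
--
-- def _looks_like_jd_number(name: str) -> bool: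
--     """Check if a folder name looks like it contains a JD number."""
--     parts = name.split()
--     if not parts:
--         return False
--     first = parts[0]
--     template = _JD_TEMPLATES.get(len(first))
--     if template is None:
--         return False
--     return all(c == "." if p == "." else c.isdigit() for c, p in zip(first, template))
-- ===== Notes on version B (the rewrite author's own statement) =====
-- stated objective: alternative
-- what changed: Replaces A's dot-splitting plus three branch tests with positional template matching: the first token's length selects a template (dd, dd.dd or dd.dd.ddd) and each character is checked in place against it, with no splitting of the token at all.
import Mathlib
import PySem

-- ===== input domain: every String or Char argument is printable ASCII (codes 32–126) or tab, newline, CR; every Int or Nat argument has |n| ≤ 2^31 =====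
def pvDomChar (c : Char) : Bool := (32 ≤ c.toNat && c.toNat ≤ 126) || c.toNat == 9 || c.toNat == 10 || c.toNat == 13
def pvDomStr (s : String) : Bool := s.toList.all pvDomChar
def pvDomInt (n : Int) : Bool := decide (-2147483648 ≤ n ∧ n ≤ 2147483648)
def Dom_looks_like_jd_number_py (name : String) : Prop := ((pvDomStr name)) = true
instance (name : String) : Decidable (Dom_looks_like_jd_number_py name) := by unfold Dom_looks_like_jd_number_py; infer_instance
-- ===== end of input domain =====

-- B replaces A's split-on-'.' branch tests with positional template matching (the first
-- token's length selects a template 'dd'/'dd.dd'/'dd.dd.ddd' checked char by char);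
-- objective: alternative (same cost, no dot-splitting).

-- ===== PORT A =====
-- Literal transliteration of A: split on whitespace, guard the empty list, then the
-- three separate branch tests in A's order.
def looks_like_jd_number_py (name : String) : Bool :=
  let parts := PySem.Str.split₀ name
  match parts with
  | [] => false
  | first_part :: _ =>
    if PySem.Str.strIsdigit first_part && PySem.Str.len first_part == 2 then
      true
    else if PySem.Str.isIn "." first_part then
      let number_parts := PySem.Chars.splitOn first_part.toList ['.']
      if number_parts.length == 2
          && number_parts.all (fun p => PySem.Chars.strIsdigit p && p.length == 2) then
        true
      else if number_parts.length == 3 then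
        -- Python indexes number_parts[0..2] under the length-3 guard; the match is that guard
        match number_parts with
        | [p0, p1, p2] =>
          if (PySem.Chars.strIsdigit p0 && PySem.Chars.strIsdigit p1 && PySem.Chars.strIsdigit p2)
              && p0.length == 2 && p1.length == 2 && p2.length == 3 then true else false
        | _ => false
      else false
    else false

-- ===== PORT B =====
-- _JD_TEMPLATES.get(len(first)) : the dict literal keyed by int, as a function
def jdTemplate (n : Int) : Option (List Char) :=
  if n = 2 then some ['d', 'd']
  else if n = 5 then some ['d', 'd', '.', 'd', 'd']
  else if n = 9 then some ['d', 'd', '.', 'd', 'd', '.', 'd', 'd', 'd']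
  else none

def looks_like_jd_number_py_alt (name : String) : Bool :=
  match PySem.Str.split₀ name with
  | [] => false
  | first :: _ =>
    match jdTemplate (PySem.Str.len first) with
    | none => false
    | some t =>
      (first.toList.zip t).all (fun cp => if cp.2 = '.' then cp.1 == '.' else PySem.Chars.isdigit cp.1)

-- ===== PRECONDITION & SPEC =====
def Spec_looks_like_jd_number_py (name : String) (out : Bool) : Prop := out = looks_like_jd_number_py_alt name
instance (name : String) (out : Bool) : Decidable (Spec_looks_like_jd_number_py name out) := by unfold Spec_looks_like_jd_number_py; infer_instance

-- ===== CLAIM (what is proved, stated in full; the proofs are below) =====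
def Claim_equal_looks_like_jd_number_py : Prop := ∀ (name : String), Dom_looks_like_jd_number_py name → Spec_looks_like_jd_number_py name (looks_like_jd_number_py name)

-- ===== LEMMAS AND PROOFS =====

theorem pv_dig_ne {c : Char} (h : PySem.Chars.isdigit c = true) : c ≠ '.' := by
  intro hc; subst hc; exact absurd h (by decide)

theorem pv_go_nil (fuel : Nat) (cur : List Char) (acc : List (List Char)) :
    PySem.Chars.splitOn.go ['.'] fuel [] cur acc = acc.reverse ++ [cur.reverse] := by
  cases fuel <;> simp [PySem.Chars.splitOn.go]

theorem pv_go_dot (f : Nat) (rest cur : List Char) (acc : List (List Char)) :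
    PySem.Chars.splitOn.go ['.'] (f + 1) ('.' :: rest) cur acc
      = PySem.Chars.splitOn.go ['.'] f rest [] (cur.reverse :: acc) := by
  rw [PySem.Chars.splitOn.go]
  simp [List.isPrefixOf]

theorem pv_go_step (f : Nat) (c : Char) (rest cur : List Char) (acc : List (List Char))
    (h : c ≠ '.') :
    PySem.Chars.splitOn.go ['.'] (f + 1) (c :: rest) cur acc
      = PySem.Chars.splitOn.go ['.'] f rest (c :: cur) acc := by
  have hpre : List.isPrefixOf ['.'] (c :: rest) = false := by
    simp [List.isPrefixOf]
    exact fun hcc => (h hcc.symm).elim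
  rw [PySem.Chars.splitOn.go, hpre]
  simp

theorem pv_inter_cons (a s : List Char) (ss : List (List Char)) :
    List.intercalate ['.'] (a :: s :: ss) = a ++ '.' :: List.intercalate ['.'] (s :: ss) := by
  simp [List.intercalate, List.intersperse]

theorem pv_master (l : List Char) :
    ∀ (fuel : Nat) (cur : List Char) (acc : List (List Char)),
      l.length < fuel → '.' ∉ cur →
      ∃ segs, PySem.Chars.splitOn.go ['.'] fuel l cur acc = acc.reverse ++ segs ∧
        segs ≠ [] ∧ List.intercalate ['.'] segs = cur.reverse ++ l ∧ ∀ s ∈ segs, '.' ∉ s := by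
  induction l with
  | nil =>
    intro fuel cur acc _ hcur
    exact ⟨[cur.reverse], pv_go_nil fuel cur acc, by simp,
      by simp [List.intercalate], by simpa using hcur⟩
  | cons c r ih =>
    intro fuel cur acc hf hcur
    cases fuel with
    | zero => omega
    | succ f =>
      by_cases hc : c = '.'
      · subst hc
        rw [pv_go_dot]
        obtain ⟨segs, hgo, hne, hint, hnd⟩ :=
          ih f [] (cur.reverse :: acc) (by simp at hf ⊢; omega) (by simp)
        refine ⟨cur.reverse :: segs, by simpa using hgo, by simp, ?_, ?_⟩
        · cases segs with
          | nil => exact absurd rfl hne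
          | cons s ss =>
            rw [pv_inter_cons, hint]
            simp
        · intro s hs
          rcases List.mem_cons.mp hs with h1 | h1
          · subst h1; simpa using hcur
          · exact hnd s h1
      · rw [pv_go_step f c r cur acc hc]
        obtain ⟨segs, hgo, hne, hint, hnd⟩ :=
          ih f (c :: cur) acc (by simp at hf ⊢; omega)
            (by intro hm; rcases List.mem_cons.mp hm with h1 | h1
                · exact hc h1.symm
                · exact hcur h1)
        exact ⟨segs, hgo, hne, by rw [hint]; simp, hnd⟩

theorem pv_splitOn_char (cs : List Char) :
    ∃ segs, PySem.Chars.splitOn cs ['.'] = segs ∧ segs ≠ [] ∧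
      List.intercalate ['.'] segs = cs ∧ ∀ s ∈ segs, '.' ∉ s := by
  obtain ⟨segs, hgo, hne, hint, hnd⟩ := pv_master cs (cs.length + 1) [] [] (by omega) (by simp)
  exact ⟨segs, by simpa [PySem.Chars.splitOn] using hgo, hne, by simpa using hint, hnd⟩

theorem pv_isIn_dot (cs : List Char) :
    PySem.Chars.isIn ['.'] cs = true ↔ '.' ∈ cs := by
  rw [PySem.Chars.isIn_iff_infix]
  constructor
  · intro h; exact h.subset List.mem_cons_self
  · intro h
    rcases List.append_of_mem h with ⟨s, t, rfl⟩
    exact ⟨s, t, by simp⟩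

-- splitOn on the two explicit dotted shapes, from the step lemmas
theorem pv_split5 (a b d e : Char) (ha : a ≠ '.') (hb : b ≠ '.') (hd : d ≠ '.') (he : e ≠ '.') :
    PySem.Chars.splitOn [a, b, '.', d, e] ['.'] = [[a, b], [d, e]] := by
  show PySem.Chars.splitOn.go ['.'] ([a, b, '.', d, e].length + 1) [a, b, '.', d, e] [] [] = _
  simp only [List.length_cons, List.length_nil]
  rw [pv_go_step _ _ _ _ _ ha, pv_go_step _ _ _ _ _ hb, pv_go_dot,
    pv_go_step _ _ _ _ _ hd, pv_go_step _ _ _ _ _ he, pv_go_nil]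
  simp

theorem pv_split9 (a b d e g h i : Char) (ha : a ≠ '.') (hb : b ≠ '.') (hd : d ≠ '.')
    (he : e ≠ '.') (hg : g ≠ '.') (hh : h ≠ '.') (hi : i ≠ '.') :
    PySem.Chars.splitOn [a, b, '.', d, e, '.', g, h, i] ['.'] = [[a, b], [d, e], [g, h, i]] := by
  show PySem.Chars.splitOn.go ['.'] ([a, b, '.', d, e, '.', g, h, i].length + 1)
      [a, b, '.', d, e, '.', g, h, i] [] [] = _
  simp only [List.length_cons, List.length_nil]
  rw [pv_go_step _ _ _ _ _ ha, pv_go_step _ _ _ _ _ hb, pv_go_dot,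
    pv_go_step _ _ _ _ _ hd, pv_go_step _ _ _ _ _ he, pv_go_dot,
    pv_go_step _ _ _ _ _ hg, pv_go_step _ _ _ _ _ hh, pv_go_step _ _ _ _ _ hi, pv_go_nil]
  simp

theorem pv_len5 {l : List Char} (h : l.length = 5) :
    ∃ a b c d e, l = [a, b, c, d, e] := by
  rcases l with _ | ⟨a, _ | ⟨b, _ | ⟨c, _ | ⟨d, _ | ⟨e, _ | ⟨f, t⟩⟩⟩⟩⟩⟩ <;> simp_all

theorem pv_len9 {l : List Char} (h : l.length = 9) :
    ∃ a b c d e f g i j, l = [a, b, c, d, e, f, g, i, j] := by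
  rcases l with _ | ⟨a, _ | ⟨b, _ | ⟨c, _ | ⟨d, _ | ⟨e, _ | ⟨f, _ | ⟨g, _ | ⟨i, _ | ⟨j, _ | ⟨k, t⟩⟩⟩⟩⟩⟩⟩⟩⟩⟩ <;> simp_all

-- ===== VERDICT (by name: the statement is the Claim_ definition above) =====
theorem looks_like_jd_number_py_spec : Claim_equal_looks_like_jd_number_py := by
  intro name _
  unfold Spec_looks_like_jd_number_py looks_like_jd_number_py looks_like_jd_number_py_alt
  cases PySem.Str.split₀ name with
  | nil => rfl
  | cons first rest =>
    simp only
    rw [Bool.eq_iff_iff]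
    obtain ⟨segs, hseg, hne, hint, hnd⟩ := pv_splitOn_char first.toList
    constructor
    · intro hA
      by_cases h1 : (PySem.Str.strIsdigit first && PySem.Str.len first == 2) = true
      · -- branch 1: two all-digit chars
        obtain ⟨hd1, hl1⟩ := (Bool.and_eq_true _ _).mp h1
        have hlen : first.toList.length = 2 := by
          simp [PySem.Str.len] at hl1; exact_mod_cast hl1
        obtain ⟨a, b, hab⟩ := List.length_eq_two.mp hlen
        have hd : PySem.Chars.isdigit a = true ∧ PySem.Chars.isdigit b = true := by
          rw [PySem.Str.strIsdigit, hab] at hd1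
          simpa [PySem.Chars.strIsdigit] using hd1
        simp [PySem.Str.len, hab, jdTemplate, hd.1, hd.2]
      · rw [if_neg (by simpa using h1)] at hA
        by_cases hin : PySem.Str.isIn "." first = true
        · rw [if_pos hin] at hA
          rw [hseg] at hA
          by_cases h2 : (segs.length == 2
              && segs.all (fun p => PySem.Chars.strIsdigit p && p.length == 2)) = true
          · obtain ⟨hl2, hall⟩ := (Bool.and_eq_true _ _).mp h2
            obtain ⟨p, q, hpq⟩ := List.length_eq_two.mp (by simpa using hl2)
            subst hpq
            simp only [List.all_cons, List.all_nil, Bool.and_true, Bool.and_eq_true,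
              beq_iff_eq] at hall
            obtain ⟨⟨hpd, hpl⟩, hqd, hql⟩ := hall
            obtain ⟨p0, p1, rfl⟩ := List.length_eq_two.mp hpl
            obtain ⟨q0, q1, rfl⟩ := List.length_eq_two.mp hql
            have hcs : first.toList = [p0, p1, '.', q0, q1] := by
              rw [← hint]; simp [List.intercalate]
            simp only [PySem.Chars.strIsdigit, List.all_cons, List.all_nil,
              Bool.and_eq_true, List.isEmpty_cons, Bool.not_false, Bool.true_and,
              Bool.and_true] at hpd hqd
            simp [PySem.Str.len, hcs, jdTemplate, hpd.1, hpd.2, hqd.1, hqd.2]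
          · rw [if_neg (by simpa using h2)] at hA
            by_cases h3 : segs.length = 3
            · obtain ⟨p, q, r, hpqr⟩ := List.length_eq_three.mp h3
              subst hpqr
              rw [if_pos (by simp)] at hA
              simp only at hA
              split_ifs at hA with hc
              obtain ⟨⟨⟨hdig, hpl⟩, hql⟩, hrl⟩ := by
                simpa only [Bool.and_eq_true, beq_iff_eq] using hc
              obtain ⟨⟨hpd, hqd⟩, hrd⟩ := hdig
              obtain ⟨p0, p1, rfl⟩ := List.length_eq_two.mp hpl
              obtain ⟨q0, q1, rfl⟩ := List.length_eq_two.mp hql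
              obtain ⟨r0, r1, r2, rfl⟩ := List.length_eq_three.mp hrl
              have hcs : first.toList = [p0, p1, '.', q0, q1, '.', r0, r1, r2] := by
                rw [← hint]; simp [List.intercalate]
              simp only [PySem.Chars.strIsdigit, List.all_cons, List.all_nil,
                Bool.and_eq_true, List.isEmpty_cons, Bool.not_false, Bool.true_and,
                Bool.and_true] at hpd hqd hrd
              simp [PySem.Str.len, hcs, jdTemplate, hpd.1, hpd.2, hqd.1, hqd.2,
                hrd.1, hrd.2.1, hrd.2.2]
            · rw [if_neg (by simpa using h3)] at hA
              exact absurd hA (by simp)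
        · rw [if_neg hin] at hA
          exact absurd hA (by simp)
    · intro hB
      by_cases e2 : first.toList.length = 2
      · obtain ⟨a, b, hab⟩ := List.length_eq_two.mp e2
        rw [PySem.Str.len, hab] at hB
        simp only [jdTemplate] at hB
        norm_num at hB
        obtain ⟨ha, hb⟩ : PySem.Chars.isdigit a = true ∧ PySem.Chars.isdigit b = true := by
          simpa [List.zip] using hB
        rw [if_pos]
        rw [PySem.Str.strIsdigit, PySem.Str.len, hab]
        simp [PySem.Chars.strIsdigit, ha, hb]
      · by_cases e5 : first.toList.length = 5
        · obtain ⟨a, b, c, d, e, hab⟩ := pv_len5 e5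
          rw [PySem.Str.len, hab] at hB
          simp only [jdTemplate] at hB
          norm_num at hB
          obtain ⟨ha, hb, hc, hd, he⟩ :
              PySem.Chars.isdigit a = true ∧ PySem.Chars.isdigit b = true ∧ c = '.' ∧
              PySem.Chars.isdigit d = true ∧ PySem.Chars.isdigit e = true := by
            simpa [List.zip] using hB
          subst hc
          rw [if_neg (by rw [PySem.Str.len, hab]; simp), if_pos]
          · rw [hab, pv_split5 a b d e (pv_dig_ne ha) (pv_dig_ne hb) (pv_dig_ne hd) (pv_dig_ne he)]
            simp [PySem.Chars.strIsdigit, ha, hb, hd, he]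
          · rw [PySem.Str.isIn]
            exact (pv_isIn_dot first.toList).mpr (by rw [hab]; simp)
        · by_cases e9 : first.toList.length = 9
          · obtain ⟨a, b, c, d, e, f, g, i, j, hab⟩ := pv_len9 e9
            rw [PySem.Str.len, hab] at hB
            simp only [jdTemplate] at hB
            norm_num at hB
            obtain ⟨ha, hb, hc, hd, he, hf, hg, hi, hj⟩ :
                PySem.Chars.isdigit a = true ∧ PySem.Chars.isdigit b = true ∧ c = '.' ∧
                PySem.Chars.isdigit d = true ∧ PySem.Chars.isdigit e = true ∧ f = '.' ∧
                PySem.Chars.isdigit g = true ∧ PySem.Chars.isdigit i = true ∧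
                PySem.Chars.isdigit j = true := by
              simpa [List.zip] using hB
            subst hc; subst hf
            rw [if_neg (by rw [PySem.Str.len, hab]; simp), if_pos]
            · rw [hab, pv_split9 a b d e g i j (pv_dig_ne ha) (pv_dig_ne hb) (pv_dig_ne hd)
                (pv_dig_ne he) (pv_dig_ne hg) (pv_dig_ne hi) (pv_dig_ne hj)]
              simp [PySem.Chars.strIsdigit, ha, hb, hd, he, hg, hi, hj]
            · rw [PySem.Str.isIn]
              exact (pv_isIn_dot first.toList).mpr (by rw [hab]; simp)
          · exfalso
            have hl : first.toList.length = first.length := by simp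
            have h2 : ((first.length : Int) ≠ 2) := by rw [← hl]; exact_mod_cast e2
            have h5 : ((first.length : Int) ≠ 5) := by rw [← hl]; exact_mod_cast e5
            have h9 : ((first.length : Int) ≠ 9) := by rw [← hl]; exact_mod_cast e9
            rw [PySem.Str.len] at hB
            simp [jdTemplate, h2, h5, h9] at hB
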